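-- pv_equiv track=rewrite | github.com/sksumanta/python3Basic | CommanQusAns.py | primeCount
-- ===== SOURCE A (Python) =====
-- def primeCount(n):
--     #
--     # Write your code here.
--     #
--     prime = [2, 3, 5, 7, 11, 13, 17, 19, 23, 29, 31, 37, 41, 43, 47, 53,
--                                       59, 61, 67, 71, 73, 79, 83, 89, 97, 101]
--     res=1
--     c=0
--     if n == 1:
--         return c
--     else:
--         for p in prime:
--             res=res*p
--             if res <= n:
--                 c = c+1
--         return c
-- ===== SOURCE B (Python) =====
-- _PRIMES = [2, 3, 5, 7, 11, 13, 17, 19, 23, 29, 31, 37, 41, 43, 47, 53,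
--            59, 61, 67, 71, 73, 79, 83, 89, 97, 101]
--
-- # Precomputed once: strictly increasing table of primorials (prefix products).
-- _PRIMORIALS = []
-- _acc = 1
-- for _p in _PRIMES:
--     _acc *= _p
--     _PRIMORIALS.append(_acc)
--
--
-- def primeCount(n):
--     # Binary search (bisect_right by hand): count of primorials <= n.
--     lo, hi = 0, len(_PRIMORIALS)
--     while lo < hi:
--         mid = (lo + hi) // 2
--         if n < _PRIMORIALS[mid]:
--             hi = mid
--         else:
--             lo = mid + 1
--     return lo
-- ===== Notes on version B (the rewrite author's own statement) =====
-- stated objective: alternative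
-- what changed: B precomputes the fixed primorial table once (strictly increasing prefix products of the prime list) and binary-searches (bisect_right) for n instead of recomputing products and scanning the whole prime list per call.
import Mathlib
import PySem

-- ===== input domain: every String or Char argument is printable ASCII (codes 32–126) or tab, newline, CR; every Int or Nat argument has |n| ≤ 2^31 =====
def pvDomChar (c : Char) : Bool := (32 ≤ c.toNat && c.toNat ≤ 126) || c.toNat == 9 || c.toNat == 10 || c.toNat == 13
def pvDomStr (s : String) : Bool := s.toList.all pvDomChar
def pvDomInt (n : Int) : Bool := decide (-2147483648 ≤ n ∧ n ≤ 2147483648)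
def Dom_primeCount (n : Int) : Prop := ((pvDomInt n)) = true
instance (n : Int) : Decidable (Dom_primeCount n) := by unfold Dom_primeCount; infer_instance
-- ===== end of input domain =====

-- B replaces A's per-call multiply-and-compare loop with a one-time strictly
-- increasing primorial table and a hand-written bisect_right (binary search);
-- alternative decomposition, same exact values.

-- ===== PORT A =====
def primeCount (n : Int) : Int :=
  let prime : List Int := [2, 3, 5, 7, 11, 13, 17, 19, 23, 29, 31, 37, 41, 43, 47, 53,
                           59, 61, 67, 71, 73, 79, 83, 89, 97, 101]
  if n = 1 then 0
  else
    (prime.foldl (fun (st : Int × Int) p =>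
      let res := st.1 * p
      (res, if res ≤ n then st.2 + 1 else st.2)) (1, 0)).2

-- ===== PORT B =====
def pvPrimes : List Int := [2, 3, 5, 7, 11, 13, 17, 19, 23, 29, 31, 37, 41, 43, 47, 53,
                            59, 61, 67, 71, 73, 79, 83, 89, 97, 101]

-- the module-level table-building loop of Source B (acc *= p; append acc)
def pvAccum : Int → List Int → List Int
  | _, [] => []
  | acc, p :: ps => (acc * p) :: pvAccum (acc * p) ps

def pvPrimorials : List Int := pvAccum 1 pvPrimes

-- termination helper for the binary-search midpoint (cited by decreasing_by)
theorem pv_mid_bounds (lo hi : Int) (h : lo < hi) :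
    lo ≤ PySem.Int.floordiv (lo + hi) 2 ∧ PySem.Int.floordiv (lo + hi) 2 < hi := by
  have h1 := PySem.Int.floordiv_two_mid_bounds (le_of_lt h)
  have h2 : PySem.Int.floordiv (lo + hi) 2 < hi := by
    rw [PySem.Int.floordiv_lt_iff_lt_mul (by omega : (0:Int) < 2)]; omega
  exact ⟨h1.1, h2⟩

-- the while-loop of Source B's hand-written bisect_right
def pvBisect (a : List Int) (x : Int) (lo hi : Int) : Int :=
  if h : lo < hi then
    let mid := PySem.Int.floordiv (lo + hi) 2
    if x < (PySem.List.pyGet? a mid).getD 0 then pvBisect a x lo mid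
    else pvBisect a x (mid + 1) hi
  else lo
termination_by (hi - lo).toNat
decreasing_by
  · have := pv_mid_bounds lo hi h; omega
  · have := pv_mid_bounds lo hi h; omega

def primeCount_alt (n : Int) : Int :=
  pvBisect pvPrimorials n 0 (pvPrimorials.length : Int)

-- ===== PRECONDITION & SPEC =====
def Spec_primeCount (n : Int) (out : Int) : Prop := out = primeCount_alt n
instance (n : Int) (out : Int) : Decidable (Spec_primeCount n out) := by unfold Spec_primeCount; infer_instance

-- ===== CLAIM (what is proved, stated in full; the proofs are below) =====
def Claim_equal_primeCount : Prop := ∀ (n : Int), Dom_primeCount n → Spec_primeCount n (primeCount n)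

-- ===== LEMMAS AND PROOFS =====

-- A's fold counts, among the prefix products of the remaining primes, those ≤ n
theorem pvFoldA_count (n : Int) (ps : List Int) : ∀ (res c : Int),
    (ps.foldl (fun (st : Int × Int) p =>
      let r := st.1 * p
      (r, if r ≤ n then st.2 + 1 else st.2)) (res, c)).2
    = c + ((pvAccum res ps).countP (fun t => decide (t ≤ n)) : Int) := by
  induction ps with
  | nil => intro res c; simp [pvAccum]
  | cons p ps ih =>
    intro res c
    simp only [List.foldl_cons, pvAccum, List.countP_cons]
    rw [ih]
    by_cases h : res * p ≤ n <;> simp [h] <;> try omega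


-- if the first k elements are ≤ x and the rest are > x, the count of ≤ x is k
theorem pvCount_split (a : List Int) (x : Int) (k : Nat) (hk : k ≤ a.length)
    (hlo : ∀ i : Nat, (h : i < a.length) → i < k → a[i] ≤ x)
    (hhi : ∀ i : Nat, (h : i < a.length) → k ≤ i → x < a[i]) :
    a.countP (fun t => decide (t ≤ x)) = k := by
  have hsplit : a = a.take k ++ a.drop k := (List.take_append_drop k a).symm
  rw [hsplit, List.countP_append]
  have hlt : (a.take k).length = k := by simp [List.length_take]; omega
  have h1 : (a.take k).countP (fun t => decide (t ≤ x)) = (a.take k).length := by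
    rw [List.countP_eq_length]
    intro t ht
    obtain ⟨i, hi, rfl⟩ := List.getElem_of_mem ht
    have hik : i < k := by omega
    have hilen : i < a.length := by omega
    rw [List.getElem_take]
    exact decide_eq_true (hlo i hilen hik)
  have h2 : (a.drop k).countP (fun t => decide (t ≤ x)) = 0 := by
    rw [List.countP_eq_zero]
    intro t ht
    obtain ⟨i, hi, rfl⟩ := List.getElem_of_mem ht
    have hilen : k + i < a.length := by
      have := List.length_drop (l := a) (i := k); omega
    rw [List.getElem_drop]
    simpa using not_le.mpr (hhi (k + i) hilen (by omega))
  rw [h1, h2, hlt]; omega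

-- binary-search invariant: pvBisect returns the count of elements ≤ x
theorem pvBisect_count (a : List Int) (x : Int) (hs : a.Pairwise (· < ·)) :
    ∀ (m : Nat) (lo hi : Int), (hi - lo).toNat = m →
    0 ≤ lo → lo ≤ hi → hi ≤ (a.length : Int) →
    (∀ i : Nat, (h : i < a.length) → (i : Int) < lo → a[i] ≤ x) →
    (∀ i : Nat, (h : i < a.length) → hi ≤ (i : Int) → x < a[i]) →
    pvBisect a x lo hi = (a.countP (fun t => decide (t ≤ x)) : Int) := by
  intro m
  induction m using Nat.strong_induction_on with
  | _ m ih =>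
    intro lo hi hm h0 hlh hhl hlo hhi
    rw [pvBisect]
    by_cases h : lo < hi
    · simp only [h, dite_true]
      obtain ⟨hm1, hm2⟩ := pv_mid_bounds lo hi h
      set mid := PySem.Int.floordiv (lo + hi) 2 with hmid
      have hmlt : mid.toNat < a.length := by omega
      have hget : (PySem.List.pyGet? a mid).getD 0 = a[mid.toNat] := by
        rw [PySem.List.pyGet?_eq_some_getElem a (by omega) (by omega)]; rfl
      rw [hget]
      have hpair := List.pairwise_iff_getElem.mp hs
      by_cases hc : x < a[mid.toNat]
      · simp only [hc, if_true]
        exact ih (mid - lo).toNat (by omega) lo mid rfl h0 (by omega) (by omega) hlo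
          (fun i hi' hge => by
            rcases eq_or_lt_of_le (show mid.toNat ≤ i by omega) with heq | hlt
            · simpa [← heq] using hc
            · exact lt_trans hc (hpair mid.toNat i hmlt hi' hlt))
      · simp only [hc, if_false]
        have hle : a[mid.toNat] ≤ x := le_of_not_gt hc
        exact ih (hi - (mid + 1)).toNat (by omega) (mid + 1) hi rfl (by omega) (by omega) hhl
          (fun i hi' hlt => by
            rcases eq_or_lt_of_le (show i ≤ mid.toNat by omega) with heq | hlt'
            · simpa [heq] using hle
            · exact le_of_lt (lt_of_lt_of_le (hpair i mid.toNat hi' hmlt hlt') hle))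
          hhi
    · simp only [h, dite_false]
      rw [pvCount_split a x lo.toNat (by omega)
        (fun i hi' hlt => hlo i hi' (by omega))
        (fun i hi' hge => hhi i hi' (by omega))]
      omega

theorem pvPrimorials_sorted : pvPrimorials.Pairwise (· < ·) := by decide

theorem pvAlt_count (n : Int) :
    primeCount_alt n = (pvPrimorials.countP (fun t => decide (t ≤ n)) : Int) := by
  unfold primeCount_alt
  exact pvBisect_count pvPrimorials n pvPrimorials_sorted _ 0 (pvPrimorials.length : Int)
    rfl (by omega) (Int.natCast_nonneg _) (le_refl _)
    (fun i _ hlt => absurd hlt (by omega))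
    (fun i hi' hge => absurd hge (by exact_mod_cast not_le.mpr hi'))

-- ===== VERDICT (by name: the statement is the Claim_ definition above) =====
theorem primeCount_spec : Claim_equal_primeCount := by
  intro n _
  unfold Spec_primeCount
  rw [pvAlt_count]
  unfold primeCount
  by_cases h1 : n = 1
  · subst h1
    simp only [if_true]
    decide
  · simp only [h1, if_false]
    rw [pvFoldA_count n _ 1 0]
    have : pvAccum 1 pvPrimes = pvPrimorials := rfl
    simp [pvPrimorials, pvPrimes]
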